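-- pv_equiv track=rewrite | github.com/kelvindo/lichess_puzzles | generate_puzzles.py | pawns_only_fen
-- ===== SOURCE A (Python) =====
-- def pawns_only_fen(fen):
--     board_layout = fen.split(" ")[0]
--     new_layout = []
--
--     for rank in board_layout.split("/"):
--         new_rank = ""
--         empty_squares = 0
--
--         for char in rank:
--             if char in "Pp":
--                 if empty_squares > 0:
--                     new_rank += str(empty_squares)
--                     empty_squares = 0
--                 new_rank += char
--             elif char.isdigit():
--                 empty_squares += int(char)
--             else:
--                 empty_squares += 1
--
--         if empty_squares > 0:
--             new_rank += str(empty_squares)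
--
--         new_layout.append(new_rank)
--
--     return "/".join(new_layout)
-- ===== SOURCE B (Python) =====
-- def _compress(expanded):
--     # run-length encode the dot runs back into digits
--     pieces = []
--     i = 0
--     n = len(expanded)
--     while i < n:
--         if expanded[i] == ".":
--             j = i
--             while j < n and expanded[j] == ".":
--                 j += 1
--             pieces.append(str(j - i))
--             i = j
--         else:
--             pieces.append(expanded[i])
--             i += 1
--     return "".join(pieces)
--
--
-- def pawns_only_fen(fen):
--     # Phase 1: expand each rank to one char per square ('P'/'p' kept,
--     # anything else becomes '.'s); Phase 2: recompress the dot runs.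
--     ranks = fen.split(" ")[0].split("/")
--     out = []
--     for rank in ranks:
--         expanded = "".join(
--             c if c in "Pp" else "." * (int(c) if c.isdigit() else 1)
--             for c in rank
--         )
--         out.append(_compress(expanded))
--     return "/".join(out)
-- ===== Notes on version B (the rewrite author's own statement) =====
-- stated objective: alternative
-- what changed: A's single fused loop per rank (pawn chars emitted, empty counts accumulated and flushed) is replaced by a two-phase pipeline: expand each rank to one '.' per empty square, then run-length recompress the dot runs.
import Mathlib
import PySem

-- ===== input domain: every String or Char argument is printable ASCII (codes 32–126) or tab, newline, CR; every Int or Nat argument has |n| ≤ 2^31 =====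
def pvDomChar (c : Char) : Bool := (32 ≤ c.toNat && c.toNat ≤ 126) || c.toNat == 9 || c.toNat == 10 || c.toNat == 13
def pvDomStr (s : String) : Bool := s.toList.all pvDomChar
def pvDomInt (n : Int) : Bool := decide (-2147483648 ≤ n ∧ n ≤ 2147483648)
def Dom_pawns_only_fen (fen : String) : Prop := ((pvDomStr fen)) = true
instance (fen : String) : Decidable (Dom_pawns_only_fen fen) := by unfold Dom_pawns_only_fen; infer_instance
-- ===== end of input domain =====

-- B replaces A's fused accumulator loop by an expand-to-squares / run-length-recompress
-- pipeline over an explicit per-square intermediate string (objective: alternative).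

-- ===== PORT A =====
-- A's loop body: state = (new_rank, empty_squares); branches in A's order
def pvStepA (acc : List Char × Int) (c : Char) : List Char × Int :=
  if c = 'P' ∨ c = 'p' then
    ((if acc.2 > 0 then acc.1 ++ PySem.Int.toChars acc.2 else acc.1) ++ [c], 0)
  else if PySem.Chars.isdigit c then
    -- int(char): on the ASCII domain isdigit guarantees ofChars? returns a value
    (acc.1, acc.2 + (PySem.Int.ofChars? [c]).getD 0)
  else
    (acc.1, acc.2 + 1)

def pawns_only_fen (fen : String) : String :=
  -- fen.split(" ")[0]: Python's split never returns an empty list, so [0] is its head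
  let board_layout := (PySem.Chars.splitOn fen.toList [' ']).headD []
  let new_layout := (PySem.Chars.splitOn board_layout ['/']).map (fun rank =>
    let st := rank.foldl pvStepA ([], 0)
    if st.2 > 0 then st.1 ++ PySem.Int.toChars st.2 else st.1)
  String.ofList (PySem.Chars.join ['/'] new_layout)

-- ===== PORT B =====
-- phase 1: one char per square ('P'/'p' kept, a digit d becomes d '.'s, anything else one '.')
def pvExpand (rank : List Char) : List Char :=
  rank.flatMap (fun c =>
    if c = 'P' ∨ c = 'p' then [c]
    else PySem.List.pyRepeat ['.']
      (if PySem.Chars.isdigit c then (PySem.Int.ofChars? [c]).getD 0 else 1))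

-- phase 2: run-length encode the dot runs back into digits
-- (Source B's inner while scanning the run = takeWhile/dropWhile)
def pvCompress : List Char → List Char
  | [] => []
  | c :: rest =>
    if c = '.' then
      PySem.Int.toChars (1 + (rest.takeWhile (· = '.')).length)
        ++ pvCompress (rest.dropWhile (· = '.'))
    else c :: pvCompress rest
termination_by l => l.length
decreasing_by
  · simpa using Nat.lt_succ_of_le (List.length_dropWhile_le (· = '.') rest)
  · simp

def pawns_only_fen_alt (fen : String) : String :=
  let ranks := PySem.Chars.splitOn ((PySem.Chars.splitOn fen.toList [' ']).headD []) ['/']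
  String.ofList (PySem.Chars.join ['/'] (ranks.map (fun r => pvCompress (pvExpand r))))

-- ===== PRECONDITION & SPEC =====
def Spec_pawns_only_fen (fen : String) (out : String) : Prop := out = pawns_only_fen_alt fen
instance (fen : String) (out : String) : Decidable (Spec_pawns_only_fen fen out) := by unfold Spec_pawns_only_fen; infer_instance

-- ===== CLAIM (what is proved, stated in full; the proofs are below) =====
def Claim_equal_pawns_only_fen : Prop := ∀ (fen : String), Dom_pawns_only_fen fen → Spec_pawns_only_fen fen (pawns_only_fen fen)

-- ===== LEMMAS AND PROOFS =====

-- a digit char's int value is nonnegative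
lemma pvDigit_nonneg (c : Char) (h : PySem.Chars.isdigit c = true) :
    0 ≤ (PySem.Int.ofChars? [c]).getD 0 := by
  simp [PySem.Chars.isdigit, Char.le_def] at h
  have h1 : 48 ≤ c.toNat := h.1
  have h2 : c.toNat ≤ 57 := h.2
  have hc : c = Char.ofNat c.toNat := (Char.ofNat_toNat c).symm
  interval_cases hn : c.toNat <;> rw [hc] <;> decide

-- takeWhile/dropWhile across a replicate prefix when the tail does not start with '.'
lemma pvRun_split (k : Nat) (l : List Char) (hl : l.head? ≠ some '.') :
    (List.replicate k '.' ++ l).takeWhile (· = '.') = List.replicate k '.' ∧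
    (List.replicate k '.' ++ l).dropWhile (· = '.') = l := by
  induction k with
  | zero =>
    simp only [List.replicate, List.nil_append]
    cases l with
    | nil => simp
    | cons a l' =>
      have ha : a ≠ '.' := by simpa using hl
      simp [ha]
  | succ n ih =>
    simp only [List.replicate_succ, List.cons_append, List.takeWhile_cons, List.dropWhile_cons]
    simp [ih]

-- compress across a pending run of e dots followed by a non-dot-headed tail
lemma pvCompress_replicate (e : Nat) (l : List Char) (hl : l.head? ≠ some '.') :
    pvCompress (List.replicate e '.' ++ l) =
      (if 0 < e then PySem.Int.toChars e else []) ++ pvCompress l := by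
  cases e with
  | zero => simp
  | succ k =>
    rw [List.replicate_succ, List.cons_append, pvCompress]
    rw [(pvRun_split k l hl).1, (pvRun_split k l hl).2]
    simp only [List.length_replicate, if_pos (Nat.succ_pos k)]
    push_cast
    ring_nf

-- the loop invariant: A's fold from pending state (nr, e) plus its final flush equals
-- nr ++ the recompression of e pending dots followed by the expansion of the rest
lemma pvLoop_inv (cs : List Char) (nr : List Char) (e : Nat) :
    (let st := cs.foldl pvStepA (nr, (e : Int));
     if st.2 > 0 then st.1 ++ PySem.Int.toChars st.2 else st.1) =
      nr ++ pvCompress (List.replicate e '.' ++ pvExpand cs) := by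
  induction cs generalizing nr e with
  | nil =>
    simp only [List.foldl_nil, pvExpand, List.flatMap_nil, List.append_nil]
    have hrep := pvCompress_replicate e [] (by simp)
    simp only [List.append_nil, pvCompress] at hrep
    rw [hrep]
    by_cases he : 0 < e
    · rw [if_pos (show (e:Int) > 0 by exact_mod_cast he), if_pos he]
    · rw [if_neg (show ¬ (e:Int) > 0 by exact_mod_cast he), if_neg he, List.append_nil]
  | cons c cs ih =>
    rw [List.foldl_cons]
    by_cases hp : c = 'P' ∨ c = 'p'
    · have hnd : c ≠ '.' := by rcases hp with h | h <;> simp [h]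
      have hexp : pvExpand (c :: cs) = c :: pvExpand cs := by
        simp [pvExpand, hp]
      rw [hexp, pvCompress_replicate e _ (by simpa using hnd)]
      rw [show pvCompress (c :: pvExpand cs) = c :: pvCompress (pvExpand cs) by
        rw [pvCompress, if_neg hnd]]
      have := ih ((if (e:Int) > 0 then nr ++ PySem.Int.toChars e else nr) ++ [c]) 0
      simp only [pvStepA, if_pos hp, List.replicate_zero, List.nil_append] at this ⊢
      rw [show ((0:Nat):Int) = 0 from rfl] at this
      rw [this]
      by_cases he : 0 < e
      · rw [if_pos (by exact_mod_cast he), if_pos he]; simp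
      · rw [if_neg (by exact_mod_cast he), if_neg he]; simp
    · by_cases hd : PySem.Chars.isdigit c = true
      · have hnn := pvDigit_nonneg c hd
        have hexp : pvExpand (c :: cs) = List.replicate ((PySem.Int.ofChars? [c]).getD 0).toNat '.' ++ pvExpand cs := by
          simp [pvExpand, hp, hd, PySem.List.pyRepeat_singleton]
        have hcast : (e : Int) + (PySem.Int.ofChars? [c]).getD 0
            = ((e + ((PySem.Int.ofChars? [c]).getD 0).toNat : Nat) : Int) := by
          push_cast; omega
        rw [hexp, ← List.append_assoc, ← List.replicate_add, ← ih]
        simp only [pvStepA, if_neg hp, if_pos hd, hcast]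
      · have hexp : pvExpand (c :: cs) = List.replicate 1 '.' ++ pvExpand cs := by
          simp [pvExpand, hp, hd, PySem.List.pyRepeat_singleton]
        rw [hexp, ← List.append_assoc, ← List.replicate_add]
        have := ih nr (e + 1)
        rw [← this]
        simp only [pvStepA, if_neg hp, if_neg hd]
        norm_cast

-- ===== VERDICT (by name: the statement is the Claim_ definition above) =====
theorem pawns_only_fen_spec : Claim_equal_pawns_only_fen := by
  intro fen _
  unfold Spec_pawns_only_fen pawns_only_fen pawns_only_fen_alt
  simp only
  congr 2
  apply List.map_congr_left
  intro rank _
  simpa using pvLoop_inv rank [] 0
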